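-- pv_equiv track=rewrite | github.com/SarayMordechai/HW-Python- | HW4/grades.py | get_common_elements
-- ===== SOURCE A (Python) =====
-- def get_common_elements(lstinlst):
--     '''Function that receivesList of lists and returns a list of the organs
--     that have appeared on more than one list'''
--     #A loop that puts students' grades in a list of lists
--     lst = [[int(i[j]) for j in range(len(i))] for i in lstinlst]
--     set1=set()
--     for i in range (len(lst)):
--         for j in range(i+1, len(lst)):
--             grop=(set(lst[i]) & set(lst[j]))
--             set1|=grop
--     return set1
-- ===== SOURCE B (Python) =====
-- def get_common_elements(lstinlst):
--     '''Function that receivesList of lists and returns a list of the organs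
--     that have appeared on more than one list'''
--     lst = [[int(i[j]) for j in range(len(i))] for i in lstinlst]
--     seen = set()
--     result = set()
--     for sub in lst:
--         for x in set(sub):
--             if x in seen:
--                 result.add(x)
--             else:
--                 seen.add(x)
--     return result
-- ===== Notes on version B (the rewrite author's own statement) =====
-- stated objective: faster
-- what changed: Replaces A's nested all-pairs loop (rebuilding set(lst[i]) and set(lst[j]) and intersecting them for every index pair) by one streaming pass that maintains two running sets: an element already in `seen` goes to `result`, otherwise into `seen`.
import Mathlib
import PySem

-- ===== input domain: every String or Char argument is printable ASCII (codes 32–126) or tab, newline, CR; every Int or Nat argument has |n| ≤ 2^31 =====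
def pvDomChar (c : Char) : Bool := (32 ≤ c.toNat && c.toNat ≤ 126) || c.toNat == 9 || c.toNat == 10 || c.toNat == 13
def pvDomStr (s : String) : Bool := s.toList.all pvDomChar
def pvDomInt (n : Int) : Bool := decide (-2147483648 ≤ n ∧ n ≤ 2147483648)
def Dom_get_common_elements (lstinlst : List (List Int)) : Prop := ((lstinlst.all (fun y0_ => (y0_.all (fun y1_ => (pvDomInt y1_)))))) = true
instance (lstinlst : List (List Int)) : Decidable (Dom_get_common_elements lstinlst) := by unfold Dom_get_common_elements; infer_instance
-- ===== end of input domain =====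

-- B replaces A's nested all-pairs intersection loop by ONE streaming pass keeping two
-- running sets (seen / result); objective: faster (one pass instead of all index pairs).
-- Both Pythons return a set; Python's set ITERATION order is not modelled by PySem
-- (PYSEM.md), so both ports return the set's canonical sorted representative — the
-- equality proved is equality of the returned SETS.

-- ===== PORT A =====
-- A: convert every entry with int(), then union the pairwise intersections
-- set(lst[i]) & set(lst[j]) over all index pairs i < j; return that set.
def get_common_elements (lstinlst : List (List Int)) : List Int :=
  -- lst = [[int(i[j]) for j in range(len(i))] for i in lstinlst]  (int() on an int is the identity)
  let lst := lstinlst.map (fun i => (PySem.List.pyRange 0 (PySem.List.len i)).map (fun j => PySem.List.pyGetD i j 0))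
  let n := PySem.List.len lst
  let set1 := (PySem.List.pyRange 0 n).foldl
    (fun set1 i =>
      (PySem.List.pyRange (i + 1) n).foldl
        (fun set1 j =>
          PySem.Set.union set1
            (PySem.Set.inter (PySem.Set.ofList (PySem.List.pyGetD lst i []))
              (PySem.Set.ofList (PySem.List.pyGetD lst j []))))
        set1)
    PySem.Set.empty
  -- 'return set1' — a set; returned as its canonical sorted representative
  PySem.List.sorted set1 (fun x => x)

-- ===== PORT B =====
-- B: one pass; for each sublist, each distinct element already in `seen` goes into
-- `result`, otherwise into `seen`; return `result` (same canonical representative).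
def get_common_elements_alt (lstinlst : List (List Int)) : List Int :=
  let lst := lstinlst.map (fun i => (PySem.List.pyRange 0 (PySem.List.len i)).map (fun j => PySem.List.pyGetD i j 0))
  let p := lst.foldl
    (fun (p : List Int × List Int) sub =>
      (PySem.Set.ofList sub).foldl
        (fun (p : List Int × List Int) x =>
          if PySem.Set.contains p.1 x then (p.1, PySem.Set.add p.2 x)
          else (PySem.Set.add p.1 x, p.2))
        p)
    (PySem.Set.empty, PySem.Set.empty)
  -- 'return result' — a set; returned as its canonical sorted representative
  PySem.List.sorted p.2 (fun x => x)

-- ===== PRECONDITION & SPEC =====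
def Spec_get_common_elements (lstinlst : List (List Int)) (out : List Int) : Prop := out = get_common_elements_alt lstinlst
instance (lstinlst : List (List Int)) (out : List Int) : Decidable (Spec_get_common_elements lstinlst out) := by unfold Spec_get_common_elements; infer_instance

-- ===== CLAIM (what is proved, stated in full; the proofs are below) =====
def Claim_equal_get_common_elements : Prop := ∀ (lstinlst : List (List Int)), Dom_get_common_elements lstinlst → Spec_get_common_elements lstinlst (get_common_elements lstinlst)

-- ===== LEMMAS AND PROOFS =====

-- the common-element candidates, concatenated in A's pair order (proof device)
def pvPairs : List (List Int) → List Int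
  | [] => []
  | h :: t => (t.flatMap fun o => PySem.Set.inter (PySem.Set.ofList h) (PySem.Set.ofList o)) ++ pvPairs t

-- B's inner and outer folds, named so the lemmas can speak about them (defeq to the port's folds)
def pvB1 (p : List Int × List Int) (ys : List Int) : List Int × List Int :=
  ys.foldl
    (fun (p : List Int × List Int) x =>
      if PySem.Set.contains p.1 x then (p.1, PySem.Set.add p.2 x)
      else (PySem.Set.add p.1 x, p.2))
    p

def pvB2 (lst : List (List Int)) (p : List Int × List Int) : List Int × List Int :=
  lst.foldl (fun p sub => pvB1 p (PySem.Set.ofList sub)) p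

-- ---------- A-side: the double index loop builds set(pvPairs lst) ----------

theorem pvUpdate_append (s xs ys : List Int) :
    PySem.Set.update s (xs ++ ys) = PySem.Set.update (PySem.Set.update s xs) ys := by
  simp [PySem.Set.update, List.foldl_append]

theorem pvFoldUpdate {β : Type} (t : List β) (f : β → List Int) (s : List Int) :
    t.foldl (fun s o => PySem.Set.update s (f o)) s = PySem.Set.update s (t.flatMap f) := by
  induction t generalizing s with
  | nil => rfl
  | cons o t ih => simp [ih, pvUpdate_append]

-- index shift for ranges
theorem pvRange_shift (a b : Int) :
    PySem.List.pyRange (a + 1) (b + 1) = (PySem.List.pyRange a b).map (fun x => x + 1) := by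
  rw [PySem.List.pyRange_one, PySem.List.pyRange_one, List.map_map]
  have : (b + 1 - (a + 1)).toNat = (b - a).toNat := by omega
  rw [this]
  exact List.map_congr_left (fun k _ => by simp; ring)

theorem pvGetD_cons_shift (h : List Int) (t : List (List Int)) (x : Int) (hx : 0 ≤ x) :
    PySem.List.pyGetD (h :: t) (x + 1) [] = PySem.List.pyGetD t x [] := by
  obtain ⟨k, rfl⟩ : ∃ k : Nat, x = (k : Int) := ⟨x.toNat, (Int.toNat_of_nonneg hx).symm⟩
  have hk : ((k : Int) + 1) = ((k + 1 : Nat) : Int) := by push_cast; ring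
  rw [hk, PySem.List.pyGetD_natCast, PySem.List.pyGetD_natCast]
  rfl

theorem pvFlatMap_getD {β : Type} (t : List (List Int)) (G : List Int → List β) :
    (PySem.List.pyRange 0 (t.length : Int)).flatMap (fun j => G (PySem.List.pyGetD t j [])) = t.flatMap G := by
  conv_rhs => rw [← PySem.List.map_pyGetD_pyRange_zero' t []]
  rw [List.flatMap_map]

theorem pvFoldUnion (I : List Int) (g : Int → List Int) (s : List Int) :
    I.foldl (fun s1 j => PySem.Set.union s1 (g j)) s = PySem.Set.update s (I.flatMap g) :=
  pvFoldUpdate I g s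

-- A's double index loop produces the pvPairs concatenation
theorem pvPairs_eq (lst : List (List Int)) :
    (PySem.List.pyRange 0 (lst.length : Int)).flatMap
      (fun i => (PySem.List.pyRange (i + 1) (lst.length : Int)).flatMap
        (fun j => PySem.Set.inter (PySem.Set.ofList (PySem.List.pyGetD lst i []))
          (PySem.Set.ofList (PySem.List.pyGetD lst j []))))
    = pvPairs lst := by
  induction lst with
  | nil => simp [pvPairs, PySem.List.pyRange_one]
  | cons h t ih =>
    have hpos : (0 : Int) < (t.length : Int) + 1 := by positivity
    have hshift1 : PySem.List.pyRange 1 ((t.length : Int) + 1)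
        = (PySem.List.pyRange 0 (t.length : Int)).map (fun x => x + 1) := by
      simpa using pvRange_shift 0 (t.length : Int)
    simp only [List.length_cons, Nat.cast_add, Nat.cast_one]
    rw [PySem.List.pyRange_one_cons hpos, List.flatMap_cons,
      show (0 : Int) + 1 = 1 from by norm_num]
    have hd : (PySem.List.pyRange 1 ((t.length : Int) + 1)).flatMap
        (fun j => PySem.Set.inter (PySem.Set.ofList (PySem.List.pyGetD (h :: t) 0 []))
          (PySem.Set.ofList (PySem.List.pyGetD (h :: t) j [])))
        = t.flatMap (fun o => PySem.Set.inter (PySem.Set.ofList h) (PySem.Set.ofList o)) := by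
      rw [PySem.List.pyGetD_zero_cons]
      rw [hshift1, List.flatMap_map]
      rw [List.flatMap_congr (fun j hj => by
        rw [pvGetD_cons_shift h t j (PySem.List.mem_pyRange_one.mp hj).1])]
      exact pvFlatMap_getD t (fun o => PySem.Set.inter (PySem.Set.ofList h) (PySem.Set.ofList o))
    have tl : (PySem.List.pyRange 1 ((t.length : Int) + 1)).flatMap
        (fun i => (PySem.List.pyRange (i + 1) ((t.length : Int) + 1)).flatMap
          (fun j => PySem.Set.inter (PySem.Set.ofList (PySem.List.pyGetD (h :: t) i []))
            (PySem.Set.ofList (PySem.List.pyGetD (h :: t) j []))))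
        = pvPairs t := by
      rw [hshift1, List.flatMap_map]
      rw [List.flatMap_congr (fun i hi => ?_), ih]
      have hi0 : 0 ≤ i := (PySem.List.mem_pyRange_one.mp hi).1
      rw [pvGetD_cons_shift h t i hi0]
      rw [pvRange_shift (i + 1) (t.length : Int), List.flatMap_map]
      exact List.flatMap_congr (fun j hj => by
        have hj1 : i + 1 ≤ j := (PySem.List.mem_pyRange_one.mp hj).1
        rw [pvGetD_cons_shift h t j (by omega)])
    rw [hd, tl]
    rfl

-- the conversion line is the identity on List (List Int)
theorem pvConv (lstinlst : List (List Int)) :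
    lstinlst.map (fun i => (PySem.List.pyRange 0 (PySem.List.len i)).map (fun j => PySem.List.pyGetD i j 0)) = lstinlst := by
  have h : ∀ i ∈ lstinlst,
      (PySem.List.pyRange 0 (PySem.List.len i)).map (fun j => PySem.List.pyGetD i j 0) = id i := by
    intro i _
    exact PySem.List.map_pyGetD_pyRange_zero i 0
  rw [List.map_congr_left h, List.map_id]

theorem pvA_eq (lstinlst : List (List Int)) :
    get_common_elements lstinlst
      = PySem.List.sorted (PySem.Set.ofList (pvPairs lstinlst)) (fun x => x) := by
  unfold get_common_elements
  simp only [pvConv]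
  simp only [pvFoldUnion]
  rw [pvFoldUpdate]
  rw [show PySem.List.len lstinlst = (lstinlst.length : Int) from rfl]
  rw [pvPairs_eq]
  rfl

-- membership in pvPairs = appearing in at least two of the sublists
theorem pvMem_pvPairs (lst : List (List Int)) (z : Int) :
    z ∈ pvPairs lst ↔ 2 ≤ lst.countP (fun s => decide (z ∈ s)) := by
  induction lst with
  | nil => simp [pvPairs]
  | cons h t ih =>
    have hex : (∃ o ∈ t, z ∈ o) ↔ 0 < t.countP (fun s => decide (z ∈ s)) := by
      rw [List.countP_pos_iff]; simp
    have hflat : z ∈ (t.flatMap fun o => PySem.Set.inter (PySem.Set.ofList h) (PySem.Set.ofList o))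
        ↔ z ∈ h ∧ ∃ o ∈ t, z ∈ o := by
      simp only [List.mem_flatMap, PySem.Set.mem_inter, PySem.Set.mem_ofList]
      tauto
    rw [show pvPairs (h :: t)
        = (t.flatMap fun o => PySem.Set.inter (PySem.Set.ofList h) (PySem.Set.ofList o)) ++ pvPairs t
      from rfl]
    rw [List.mem_append, hflat, ih, hex, List.countP_cons]
    by_cases hz : z ∈ h <;> simp [hz] <;> first
      | omega
      | (intro hcc
         have hp := List.countP_pos_iff.mp
           (show 0 < List.countP (fun s => decide (z ∈ s)) t by omega)
         simpa using hp)

-- ---------- B-side: membership and nodup invariants of the streaming pass ----------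

theorem pvB1_fst_mem (ys : List Int) (p : List Int × List Int) (z : Int) :
    z ∈ (pvB1 p ys).1 ↔ z ∈ p.1 ∨ z ∈ ys := by
  induction ys generalizing p with
  | nil => simp [pvB1]
  | cons y ys ih =>
    show z ∈ (pvB1 (if PySem.Set.contains p.1 y then (p.1, PySem.Set.add p.2 y)
        else (PySem.Set.add p.1 y, p.2)) ys).1 ↔ _
    by_cases hc : PySem.Set.contains p.1 y
    · have hy : y ∈ p.1 := (PySem.Set.contains_iff p.1 y).mp hc
      rw [if_pos hc, ih]
      simp only [List.mem_cons]
      have h1 : z = y → z ∈ p.1 := fun e => e ▸ hy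
      tauto
    · rw [if_neg hc, ih]
      simp only [PySem.Set.mem_add, List.mem_cons]
      tauto

theorem pvB1_snd_mem (ys : List Int) (p : List Int × List Int) (z : Int) (hys : ys.Nodup) :
    z ∈ (pvB1 p ys).2 ↔ z ∈ p.2 ∨ (z ∈ p.1 ∧ z ∈ ys) := by
  induction ys generalizing p with
  | nil => simp [pvB1]
  | cons y ys ih =>
    obtain ⟨hy_not, hnd⟩ := List.nodup_cons.mp hys
    show z ∈ (pvB1 (if PySem.Set.contains p.1 y then (p.1, PySem.Set.add p.2 y)
        else (PySem.Set.add p.1 y, p.2)) ys).2 ↔ _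
    by_cases hc : PySem.Set.contains p.1 y
    · have hy : y ∈ p.1 := (PySem.Set.contains_iff p.1 y).mp hc
      rw [if_pos hc, ih _ hnd]
      simp only [PySem.Set.mem_add, List.mem_cons]
      have h1 : z = y → z ∈ p.1 := fun e => e ▸ hy
      tauto
    · have hy : y ∉ p.1 := fun hm => hc ((PySem.Set.contains_iff p.1 y).mpr hm)
      rw [if_neg hc, ih _ hnd]
      simp only [PySem.Set.mem_add, List.mem_cons]
      have h1 : z = y → z ∉ ys := fun e => e ▸ hy_not
      have h2 : z = y → z ∉ p.1 := fun e => e ▸ hy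
      tauto

theorem pvB1_snd_nodup (ys : List Int) (p : List Int × List Int) (hp : p.2.Nodup) :
    (pvB1 p ys).2.Nodup := by
  induction ys generalizing p with
  | nil => exact hp
  | cons y ys ih =>
    show ((pvB1 (if PySem.Set.contains p.1 y then (p.1, PySem.Set.add p.2 y)
        else (PySem.Set.add p.1 y, p.2)) ys).2).Nodup
    split
    · exact ih _ (PySem.Set.nodup_add p.2 y hp)
    · exact ih _ hp

theorem pvB2_snd_mem (lst : List (List Int)) (p : List Int × List Int) (z : Int) :
    z ∈ (pvB2 lst p).2 ↔ z ∈ p.2 ∨ (z ∈ p.1 ∧ 1 ≤ lst.countP (fun s => decide (z ∈ s)))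
      ∨ 2 ≤ lst.countP (fun s => decide (z ∈ s)) := by
  induction lst generalizing p with
  | nil => simp [pvB2]
  | cons sub t ih =>
    show z ∈ (pvB2 t (pvB1 p (PySem.Set.ofList sub))).2 ↔ _
    rw [ih, pvB1_snd_mem _ _ _ (PySem.Set.nodup_ofList sub), pvB1_fst_mem, PySem.Set.mem_ofList]
    simp only [List.countP_cons]
    by_cases h2 : z ∈ p.2 <;> by_cases h1 : z ∈ p.1 <;> by_cases hz : z ∈ sub <;>
      simp [h1, h2, hz] <;> first
      | omega
      | (intro hcc
         have hp := List.countP_pos_iff.mp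
           (show 0 < List.countP (fun s => decide (z ∈ s)) t by omega)
         simpa using hp)

theorem pvB2_snd_nodup (lst : List (List Int)) (p : List Int × List Int) (hp : p.2.Nodup) :
    (pvB2 lst p).2.Nodup := by
  induction lst generalizing p with
  | nil => exact hp
  | cons sub t ih =>
    exact ih _ (pvB1_snd_nodup _ _ hp)

theorem pvB_eq (lstinlst : List (List Int)) :
    get_common_elements_alt lstinlst
      = PySem.List.sorted (pvB2 lstinlst (PySem.Set.empty, PySem.Set.empty)).2 (fun x => x) := by
  unfold get_common_elements_alt
  simp only [pvConv]
  rfl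

-- ---------- the two result sets are permutations, hence equal once sorted ----------

theorem pvPerm (lstinlst : List (List Int)) :
    (PySem.Set.ofList (pvPairs lstinlst)).Perm (pvB2 lstinlst (PySem.Set.empty, PySem.Set.empty)).2 := by
  rw [List.perm_ext_iff_of_nodup (PySem.Set.nodup_ofList _)
    (pvB2_snd_nodup _ _ List.nodup_nil)]
  intro z
  rw [PySem.Set.mem_ofList, pvMem_pvPairs, pvB2_snd_mem]
  show _ ↔ z ∈ ([] : List Int) ∨ (z ∈ ([] : List Int) ∧ _) ∨ _
  simp

-- ===== VERDICT (by name: the statement is the Claim_ definition above) =====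
theorem get_common_elements_spec : Claim_equal_get_common_elements := by
  intro lstinlst _
  unfold Spec_get_common_elements
  rw [pvA_eq, pvB_eq]
  exact PySem.List.sorted_eq_sorted_of_perm _ _ (fun x => x)
    (fun a b h => h) (pvPerm lstinlst)
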